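-- pv_equiv track=rewrite | github.com/boknowswiki/mytraning | lintcode/python/1396_set_union.py | setUnion
-- ===== SOURCE A (Python) =====
-- def setUnion(sets):
--     # Write your code here
--     n = len(sets)
--     dsu = DSU(n)
--     setMap = {}
--     for i in range(len(sets)):
--         set = sets[i]
--         for j in range(len(set)):
--             if set[j] in setMap:
--                 dsu.union(i, setMap[set[j]])
--             else:
--                 setMap[set[j]] = i
--     return dsu.count
--
-- class DSU:
--     def __init__(self, length):
--         self.parent = [i for i in range(length)]
--         self.size = [1 for i in range(length)]
--         self.count = length
--
--     def find(self, point):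
--         if point != self.parent[point]:
--             self.parent[point] = self.find(self.parent[point])
--         return self.parent[point]
--
--     def union(self, point1, point2):
--         root1 = self.find(point1)
--         root2 = self.find(point2)
--         if root1 == root2:
--             return
--         if self.size[root1] <= self.size[root2]:
--             self.parent[root1] = root2
--             self.size[root2] += self.size[root1]
--         else:
--             self.parent[root2] = root1
--             self.size[root1] += self.size[root2]
--         self.count -= 1
-- ===== SOURCE B (Python) =====
-- def setUnion(sets):
--     # Quick-find: keep a flat component label per set index; merging = relabel.
--     label = list(range(len(sets)))
--     first = {}
--     for i, s in enumerate(sets):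
--         for x in s:
--             if x in first:
--                 a, b = label[i], label[first[x]]
--                 if a != b:
--                     label = [b if l == a else l for l in label]
--             else:
--                 first[x] = i
--     return len(set(label))
-- ===== Notes on version B (the rewrite author's own statement) =====
-- stated objective: simpler
-- what changed: Replaces the union-find structure (parent/size arrays, recursive find with path compression, union by size, decremented counter) with a flat quick-find component-label list that is merged by relabeling, returning the number of distinct labels at the end.
import Mathlib
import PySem

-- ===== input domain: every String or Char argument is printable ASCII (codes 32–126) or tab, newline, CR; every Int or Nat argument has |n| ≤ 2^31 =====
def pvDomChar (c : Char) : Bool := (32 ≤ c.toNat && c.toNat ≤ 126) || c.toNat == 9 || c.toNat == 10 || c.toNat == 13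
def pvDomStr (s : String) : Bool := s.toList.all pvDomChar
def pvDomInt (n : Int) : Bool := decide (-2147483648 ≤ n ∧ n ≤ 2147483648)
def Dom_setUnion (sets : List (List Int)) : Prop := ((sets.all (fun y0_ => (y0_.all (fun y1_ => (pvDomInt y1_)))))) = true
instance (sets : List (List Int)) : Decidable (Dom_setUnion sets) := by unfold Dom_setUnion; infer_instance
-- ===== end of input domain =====

-- B replaces A's union-find (parent/size arrays, recursive find with path compression,
-- union by size, decremented counter) by a flat component-label list merged by relabeling,
-- counting distinct labels at the end; objective: simpler.

-- ===== PORT A =====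
-- DSU.find with path compression; the fuel argument (called with the array length, an
-- upper bound on any root path) only makes the recursion structural — on every state A
-- reaches, Python's find terminates within it and the two agree.
def pvFind : Nat → List Nat → Nat → List Nat × Nat
  | 0, parent, p => (parent, p)
  | fuel+1, parent, p =>
    let q := parent.getD p p
    if p = q then (parent, p)
    else
      let r := pvFind fuel parent q
      (r.1.set p r.2, r.2)

-- DSU.union on the state (parent, size, count)
def pvUnion (parent : List Nat) (size : List Int) (count : Int) (p1 p2 : Nat) :
    List Nat × List Int × Int :=
  let f1 := pvFind parent.length parent p1
  let f2 := pvFind f1.1.length f1.1 p2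
  let r1 := f1.2
  let r2 := f2.2
  if r1 = r2 then (f2.1, size, count)
  else if size.getD r1 0 ≤ size.getD r2 0 then
    (f2.1.set r1 r2, size.set r2 (size.getD r2 0 + size.getD r1 0), count - 1)
  else
    (f2.1.set r2 r1, size.set r1 (size.getD r1 0 + size.getD r2 0), count - 1)

structure PvStA where
  parent : List Nat
  size : List Int
  count : Int
  map : PySem.Dict Int Nat

-- body of the inner loop: `if set[j] in setMap: dsu.union(i, setMap[set[j]]) else: setMap[set[j]] = i`
def pvStepA (i : Nat) (st : PvStA) (x : Int) : PvStA :=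
  match st.map.get? x with
  | some j =>
    let u := pvUnion st.parent st.size st.count i j
    ⟨u.1, u.2.1, u.2.2, st.map⟩
  | none => ⟨st.parent, st.size, st.count, st.map.insert x i⟩

def setUnion (sets : List (List Int)) : Int :=
  let n := sets.length
  let fin := sets.zipIdx.foldl (fun st p => p.1.foldl (pvStepA p.2) st)
      ⟨List.range n, List.replicate n (1 : Int), (n : Int), PySem.Dict.empty⟩
  fin.count

-- ===== PORT B =====
def pvRelabel (label : List Nat) (a b : Nat) : List Nat :=
  label.map (fun l => if l = a then b else l)

structure PvStB where
  label : List Nat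
  first : PySem.Dict Int Nat

def pvStepB (i : Nat) (st : PvStB) (x : Int) : PvStB :=
  match st.first.get? x with
  | some j =>
    let a := st.label.getD i 0
    let b := st.label.getD j 0
    if a ≠ b then ⟨pvRelabel st.label a b, st.first⟩ else st
  | none => ⟨st.label, st.first.insert x i⟩

def setUnion_alt (sets : List (List Int)) : Int :=
  let fin := sets.zipIdx.foldl (fun st p => p.1.foldl (pvStepB p.2) st)
      ⟨List.range sets.length, PySem.Dict.empty⟩
  ((PySem.Set.ofList fin.label).length : Int)

-- ===== PRECONDITION & SPEC =====
def Spec_setUnion (sets : List (List Int)) (out : Int) : Prop := out = setUnion_alt sets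
instance (sets : List (List Int)) (out : Int) : Decidable (Spec_setUnion sets out) := by unfold Spec_setUnion; infer_instance

-- ===== CLAIM (what is proved, stated in full; the proofs are below) =====
def Claim_equal_setUnion : Prop := ∀ (sets : List (List Int)), Dom_setUnion sets → Spec_setUnion sets (setUnion sets)

-- ===== LEMMAS AND PROOFS =====

-- iterated parent pointer
def pvIter (parent : List Nat) : Nat → Nat → Nat
  | 0, p => p
  | k+1, p => pvIter parent k (parent.getD p p)

-- the abstract forest invariant of a DSU parent array: ρ is its root map
def PvGood (parent : List Nat) (ρ : Nat → Nat) (n : Nat) : Prop :=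
  parent.length = n ∧
  (∀ p, p < n → parent.getD p p < n) ∧
  (∀ p, p < n → ρ p < n) ∧
  (∀ p, p < n → parent.getD (ρ p) (ρ p) = ρ p) ∧
  (∀ p, p < n → ρ (parent.getD p p) = ρ p) ∧
  (∀ p, p < n → ∃ k, pvIter parent k p = ρ p)

-- the joint invariant tying A's DSU state to B's label state
def PvRel (n : Nat) (a : PvStA) (b : PvStB) : Prop :=
  a.map = b.first ∧
  b.label.length = n ∧
  (∀ x j, a.map.get? x = some j → j < n) ∧
  ∃ ρ, PvGood a.parent ρ n ∧
    (∀ p q, p < n → q < n → (ρ p = ρ q ↔ b.label.getD p 0 = b.label.getD q 0)) ∧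
    a.count = (b.label.toFinset.card : Int)

lemma pvIter_add (parent : List Nat) (a b p : Nat) :
    pvIter parent (a + b) p = pvIter parent a (pvIter parent b p) := by
  induction b generalizing p with
  | zero => rfl
  | succ b ih => rw [Nat.add_succ]; exact ih (parent.getD p p)

lemma pvIter_fix (parent : List Nat) (r : Nat) (h : parent.getD r r = r) (k : Nat) :
    pvIter parent k r = r := by
  induction k with
  | zero => rfl
  | succ k ih => show pvIter parent k (parent.getD r r) = r; rw [h]; exact ih

lemma pvIter_lt (parent : List Nat) (n : Nat) (hb : ∀ q, q < n → parent.getD q q < n)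
    (k p : Nat) (hp : p < n) : pvIter parent k p < n := by
  induction k generalizing p with
  | zero => exact hp
  | succ k ih => exact ih _ (hb p hp)

lemma pvGetD_set (l : List Nat) (i q v : Nat) (hi : i < l.length) :
    (l.set i v).getD q q = if q = i then v else l.getD q q := by
  by_cases h : q = i
  · subst h
    rw [List.getD_eq_getElem _ _ (by simpa using hi), List.getElem_set_self, if_pos rfl]
  · rw [if_neg h]
    by_cases hq : q < l.length
    · rw [List.getD_eq_getElem _ _ (by simpa using hq), List.getElem_set_ne (fun hh => h hh.symm),
        List.getD_eq_getElem _ _ hq]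
    · rw [List.getD_eq_default _ _ (by simpa using Nat.le_of_not_lt hq),
        List.getD_eq_default _ _ (Nat.le_of_not_lt hq)]

lemma pvGetD_map (f : Nat → Nat) (l : List Nat) (p : Nat) (hp : p < l.length) :
    (l.map f).getD p 0 = f (l.getD p 0) := by
  rw [List.getD_eq_getElem _ _ (by simpa using hp), List.getElem_map, List.getD_eq_getElem _ _ hp]

lemma pvOfList_length (l : List Nat) : (PySem.Set.ofList l).length = l.toFinset.card := by
  have h1 := List.toFinset_card_of_nodup (PySem.Set.nodup_ofList l)
  have h2 : (PySem.Set.ofList l).toFinset = l.toFinset := by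
    ext y; simp [PySem.Set.mem_ofList]
  rw [← h1, h2]

-- pigeonhole: a chain that ever reaches its root reaches it in fewer than n steps
lemma pvReach_short (parent : List Nat) (n : Nat) (hb : ∀ q, q < n → parent.getD q q < n)
    (p r : Nat) (hp : p < n) :
    ∀ k, pvIter parent k p = r → ∃ k', k' < n ∧ pvIter parent k' p = r := by
  intro k
  induction k using Nat.strong_induction_on with
  | _ k IH =>
    intro hit
    by_cases hkn : k < n
    · exact ⟨k, hkn, hit⟩
    · obtain ⟨x, y, hxy, hfeq⟩ := Fintype.exists_ne_map_eq_of_card_lt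
        (fun j : Fin (n+1) => (⟨pvIter parent j.val p, pvIter_lt parent n hb j.val p hp⟩ : Fin n))
        (by simp)
      have hne' : x.val ≠ y.val := fun h => hxy (Fin.ext h)
      have hvals : pvIter parent x.val p = pvIter parent y.val p := congrArg Fin.val hfeq
      have main : ∀ i j : Nat, i < j → j ≤ n → pvIter parent i p = pvIter parent j p →
          ∃ k', k' < n ∧ pvIter parent k' p = r := by
        intro i j hij hjn hiter
        have key : pvIter parent k p = pvIter parent (k - (j - i)) p := by
          calc pvIter parent k p
              = pvIter parent ((k - (j - i) - i) + (i + (j - i))) p := by congr 1; omega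
            _ = pvIter parent (k - (j - i) - i) (pvIter parent (i + (j - i)) p) :=
                pvIter_add parent _ _ p
            _ = pvIter parent (k - (j - i) - i) (pvIter parent i p) := by
                have hj' : i + (j - i) = j := by omega
                rw [hj', ← hiter]
            _ = pvIter parent ((k - (j - i) - i) + i) p := (pvIter_add parent _ _ p).symm
            _ = pvIter parent (k - (j - i)) p := by congr 1; omega
        exact IH (k - (j - i)) (by omega) (Eq.trans key.symm hit)
      rcases Nat.lt_or_ge x.val y.val with hlt | hge
      · exact main x.val y.val hlt (by omega) hvals
      · exact main y.val x.val (by omega) (by omega) hvals.symm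

lemma pvFind_spec (n : Nat) (parent : List Nat) (ρ : Nat → Nat) (hg : PvGood parent ρ n) :
    ∀ (fuel k p : Nat), p < n → k < fuel → pvIter parent k p = ρ p →
      (pvFind fuel parent p).2 = ρ p ∧
      (pvFind fuel parent p).1.length = parent.length ∧
      (∀ q, (pvFind fuel parent p).1.getD q q = parent.getD q q ∨
            (q < n ∧ (pvFind fuel parent p).1.getD q q = ρ q)) := by
  obtain ⟨hlen, hb, hρlt, hroot, hedge, hreach⟩ := hg
  intro fuel
  induction fuel with
  | zero => intro k p hp hk hit; omega
  | succ fuel IH =>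
    intro k p hp hk hit
    by_cases hpq : p = parent.getD p p
    · have hfix : pvIter parent k p = p := pvIter_fix parent p hpq.symm k
      have hρp : ρ p = p := hit.symm.trans hfix
      have hgoal : pvFind (fuel+1) parent p = (parent, p) := by
        simp only [pvFind, if_pos hpq]
      rw [hgoal, hρp]
      exact ⟨rfl, rfl, fun q => Or.inl rfl⟩
    · have hq : parent.getD p p < n := hb p hp
      have hρq : ρ (parent.getD p p) = ρ p := hedge p hp
      obtain ⟨k', rfl⟩ : ∃ k', k = k' + 1 := by
        cases k with
        | zero =>
          exfalso
          have hpρ : p = ρ p := hit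
          have hroot' := hroot p hp
          rw [← hpρ] at hroot'
          exact hpq hroot'.symm
        | succ k' => exact ⟨k', rfl⟩
      have hit' : pvIter parent k' (parent.getD p p) = ρ (parent.getD p p) := by
        rw [hρq]; exact hit
      obtain ⟨h2, hlen2, hpt⟩ := IH k' (parent.getD p p) hq (by omega) hit'
      have hgoal : pvFind (fuel+1) parent p =
          ((pvFind fuel parent (parent.getD p p)).1.set p (pvFind fuel parent (parent.getD p p)).2,
           (pvFind fuel parent (parent.getD p p)).2) := by
        simp only [pvFind, if_neg hpq]
      rw [hgoal]
      refine ⟨by rw [h2]; exact hρq, by simpa using hlen2, ?_⟩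
      intro q'
      by_cases hq' : q' = p
      · subst hq'
        right
        refine ⟨hp, ?_⟩
        rw [pvGetD_set _ _ _ _ (by rw [hlen2, hlen]; exact hp), if_pos rfl, h2, hρq]
      · rw [pvGetD_set _ _ _ _ (by rw [hlen2, hlen]; exact hp), if_neg hq']
        exact hpt q'

lemma pvRho_idem (parent : List Nat) (ρ : Nat → Nat) (n : Nat) (hg : PvGood parent ρ n)
    (p : Nat) (hp : p < n) : ρ (ρ p) = ρ p := by
  obtain ⟨hlen, hb, hρlt, hroot, hedge, hreach⟩ := hg
  obtain ⟨k, hk⟩ := hreach (ρ p) (hρlt p hp)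
  rw [pvIter_fix parent (ρ p) (hroot p hp) k] at hk
  exact hk.symm

-- a pointwise "same parent or jumped to own root" change preserves the invariant (same ρ)
lemma pvGood_compress (parent parent' : List Nat) (ρ : Nat → Nat) (n : Nat)
    (hg : PvGood parent ρ n) (hl : parent'.length = parent.length)
    (hpt : ∀ q, parent'.getD q q = parent.getD q q ∨ (q < n ∧ parent'.getD q q = ρ q)) :
    PvGood parent' ρ n := by
  have hidem := pvRho_idem parent ρ n hg
  obtain ⟨hlen, hb, hρlt, hroot, hedge, hreach⟩ := hg
  have hreach' : ∀ k p, p < n → pvIter parent k p = ρ p → ∃ k2, pvIter parent' k2 p = ρ p := by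
    intro k
    induction k with
    | zero => intro p hp hit; exact ⟨0, hit⟩
    | succ k IH =>
      intro p hp hit
      rcases hpt p with heq | ⟨-, heq⟩
      · have hit' : pvIter parent k (parent.getD p p) = ρ (parent.getD p p) := by
          rw [hedge p hp]; exact hit
        obtain ⟨k2, h2⟩ := IH (parent.getD p p) (hb p hp) hit'
        refine ⟨k2 + 1, ?_⟩
        show pvIter parent' k2 (parent'.getD p p) = ρ p
        rw [heq, h2, hedge p hp]
      · exact ⟨1, heq⟩
  refine ⟨hl.trans hlen, ?_, hρlt, ?_, ?_, ?_⟩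
  · intro p hp
    rcases hpt p with heq | ⟨-, heq⟩
    · rw [heq]; exact hb p hp
    · rw [heq]; exact hρlt p hp
  · intro p hp
    rcases hpt (ρ p) with heq | ⟨-, heq⟩
    · rw [heq]; exact hroot p hp
    · rw [heq]; exact hidem p hp
  · intro p hp
    rcases hpt p with heq | ⟨-, heq⟩
    · rw [heq]; exact hedge p hp
    · rw [heq]; exact hidem p hp
  · intro p hp
    obtain ⟨k, hk⟩ := hreach p hp
    exact hreach' k p hp hk

-- linking root rl under root rw merges the two classes
lemma pvGood_link (parent : List Nat) (ρ : Nat → Nat) (n : Nat) (hg : PvGood parent ρ n)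
    (rl rw : Nat) (hrl : rl < n) (hrw : rw < n) (hne : rl ≠ rw)
    (hrootl : ρ rl = rl) (hrootw : ρ rw = rw) :
    PvGood (parent.set rl rw) (fun q => if ρ q = rl then rw else ρ q) n := by
  obtain ⟨hlen, hb, hρlt, hroot, hedge, hreach⟩ := hg
  have hrl' : rl < parent.length := by rw [hlen]; exact hrl
  have hget : ∀ q, (parent.set rl rw).getD q q = if q = rl then rw else parent.getD q q :=
    fun q => pvGetD_set parent rl q rw hrl'
  have hrootw' : parent.getD rw rw = rw := by
    have h := hroot rw hrw; rw [hrootw] at h; exact h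
  have hreach' : ∀ k q, q < n → pvIter parent k q = ρ q →
      ∃ k2, pvIter (parent.set rl rw) k2 q = if ρ q = rl then rw else ρ q := by
    intro k
    induction k with
    | zero =>
      intro q hq hit
      by_cases hql : ρ q = rl
      · refine ⟨1, ?_⟩
        show (parent.set rl rw).getD q q = _
        have hq_eq : q = rl := by rw [← hit] at hql; exact hql
        rw [hget, if_pos hq_eq, if_pos hql]
      · exact ⟨0, by simpa [hql] using hit⟩
    | succ k IH =>
      intro q hq hit
      by_cases hqrl : q = rl
      · refine ⟨1, ?_⟩
        show (parent.set rl rw).getD q q = _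
        rw [hget, if_pos hqrl, hqrl, hrootl, if_pos rfl]
      · have hit' : pvIter parent k (parent.getD q q) = ρ (parent.getD q q) := by
          rw [hedge q hq]; exact hit
        obtain ⟨k2, h2⟩ := IH (parent.getD q q) (hb q hq) hit'
        refine ⟨k2 + 1, ?_⟩
        show pvIter (parent.set rl rw) k2 ((parent.set rl rw).getD q q) = _
        rw [hget, if_neg hqrl, h2, hedge q hq]
  refine ⟨by rw [List.length_set]; exact hlen, ?_, ?_, ?_, ?_, ?_⟩
  · intro p hp
    rw [hget]
    by_cases h : p = rl
    · rw [if_pos h]; exact hrw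
    · rw [if_neg h]; exact hb p hp
  · intro p hp
    by_cases h : ρ p = rl
    · simp only [if_pos h]; exact hrw
    · simp only [if_neg h]; exact hρlt p hp
  · intro p hp
    show (parent.set rl rw).getD (if ρ p = rl then rw else ρ p) (if ρ p = rl then rw else ρ p) =
      (if ρ p = rl then rw else ρ p)
    by_cases h : ρ p = rl
    · rw [if_pos h, hget, if_neg (fun hh : rw = rl => hne hh.symm), hrootw']
    · rw [if_neg h, hget, if_neg (fun hh : ρ p = rl => h hh), hroot p hp]
  · intro p hp
    show (if ρ ((parent.set rl rw).getD p p) = rl then rw else ρ ((parent.set rl rw).getD p p)) =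
      (if ρ p = rl then rw else ρ p)
    by_cases hprl : p = rl
    · rw [hget, if_pos hprl, hrootw, if_neg (fun hh : rw = rl => hne hh.symm), hprl, hrootl,
        if_pos rfl]
    · rw [hget, if_neg hprl, hedge p hp]
  · intro p hp
    obtain ⟨k, hk⟩ := hreach p hp
    exact hreach' k p hp hk

lemma pvCollapse_iff (la lb u v : Nat) :
    ((if u = la then lb else u) = (if v = la then lb else v)) ↔
      (u = v ∨ (u = la ∧ v = lb) ∨ (u = lb ∧ v = la)) := by
  split_ifs <;> omega
lemma pvUnion_spec (parent : List Nat) (size : List Int) (count : Int) (n : Nat)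
    (ρ : Nat → Nat) (hg : PvGood parent ρ n) (i j : Nat) (hi : i < n) (hj : j < n) :
    ∃ ρ', PvGood (pvUnion parent size count i j).1 ρ' n ∧
      (∀ a b, a < n → b < n →
        (ρ' a = ρ' b ↔ (ρ a = ρ b ∨ (ρ a = ρ i ∧ ρ b = ρ j) ∨ (ρ a = ρ j ∧ ρ b = ρ i)))) ∧
      (pvUnion parent size count i j).2.2 = (if ρ i = ρ j then count else count - 1) := by
  have hlen := hg.1
  obtain ⟨k0, hk0⟩ := hg.2.2.2.2.2 i hi
  obtain ⟨k1, hk1lt, hk1⟩ := pvReach_short parent n hg.2.1 i (ρ i) hi k0 hk0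
  have h1 := pvFind_spec n parent ρ hg parent.length k1 i hi (by rw [hlen]; exact hk1lt) hk1
  have hg1 : PvGood (pvFind parent.length parent i).1 ρ n :=
    pvGood_compress parent _ ρ n hg h1.2.1 h1.2.2
  obtain ⟨k2', hk2'⟩ := hg1.2.2.2.2.2 j hj
  obtain ⟨k2, hk2lt, hk2⟩ := pvReach_short _ n hg1.2.1 j (ρ j) hj k2' hk2'
  have h2 := pvFind_spec n _ ρ hg1 (pvFind parent.length parent i).1.length k2 j hj
    (by rw [hg1.1]; exact hk2lt) hk2
  have hg2 : PvGood (pvFind (pvFind parent.length parent i).1.length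
      (pvFind parent.length parent i).1 j).1 ρ n :=
    pvGood_compress _ _ ρ n hg1 h2.2.1 h2.2.2
  have hρi : ρ (ρ i) = ρ i := pvRho_idem parent ρ n hg i hi
  have hρj : ρ (ρ j) = ρ j := pvRho_idem parent ρ n hg j hj
  by_cases hij : ρ i = ρ j
  · have hrr : (pvFind parent.length parent i).2 =
        (pvFind (pvFind parent.length parent i).1.length (pvFind parent.length parent i).1 j).2 := by
      rw [h1.1, h2.1, hij]
    have hu : pvUnion parent size count i j =
        ((pvFind (pvFind parent.length parent i).1.length (pvFind parent.length parent i).1 j).1,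
         size, count) := by
      simp only [pvUnion]
      rw [if_pos hrr]
    rw [hu]
    refine ⟨ρ, hg2, ?_, ?_⟩
    · intro a b _ _
      constructor
      · exact fun h => Or.inl h
      · rintro (h | ⟨ha, hb⟩ | ⟨ha, hb⟩)
        · exact h
        · rw [ha, hb, hij]
        · rw [ha, hb, hij]
    · rw [if_pos hij]
  · have hrr : (pvFind parent.length parent i).2 ≠
        (pvFind (pvFind parent.length parent i).1.length (pvFind parent.length parent i).1 j).2 := by
      rw [h1.1, h2.1]; exact hij
    by_cases hsz : size.getD (pvFind parent.length parent i).2 0 ≤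
        size.getD (pvFind (pvFind parent.length parent i).1.length
          (pvFind parent.length parent i).1 j).2 0
    · have hu : (pvUnion parent size count i j).1 =
          (pvFind (pvFind parent.length parent i).1.length
            (pvFind parent.length parent i).1 j).1.set (ρ i) (ρ j) ∧
          (pvUnion parent size count i j).2.2 = count - 1 := by
        simp only [pvUnion]
        rw [if_neg hrr, if_pos hsz]
        exact ⟨by rw [h1.1, h2.1], rfl⟩
      refine ⟨fun q => if ρ q = ρ i then ρ j else ρ q, ?_, ?_, ?_⟩
      · rw [hu.1]
        have := pvGood_link _ ρ n hg2 (ρ i) (ρ j) (hg.2.2.1 i hi) (hg.2.2.1 j hj) hij hρi hρj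
        exact this
      · intro a b _ _
        constructor
        · intro h
          by_cases ha : ρ a = ρ i <;> by_cases hb : ρ b = ρ i <;>
            simp only [ha, hb, if_pos, if_false] at h <;> omega
        · intro h
          by_cases ha : ρ a = ρ i <;> by_cases hb : ρ b = ρ i <;>
            simp only [ha, hb, if_pos, if_false] <;> omega
      · rw [hu.2, if_neg hij]
    · have hu : (pvUnion parent size count i j).1 =
          (pvFind (pvFind parent.length parent i).1.length
            (pvFind parent.length parent i).1 j).1.set (ρ j) (ρ i) ∧
          (pvUnion parent size count i j).2.2 = count - 1 := by
        simp only [pvUnion]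
        rw [if_neg hrr, if_neg hsz]
        exact ⟨by rw [h1.1, h2.1], rfl⟩
      refine ⟨fun q => if ρ q = ρ j then ρ i else ρ q, ?_, ?_, ?_⟩
      · rw [hu.1]
        exact pvGood_link _ ρ n hg2 (ρ j) (ρ i) (hg.2.2.1 j hj) (hg.2.2.1 i hi)
          (fun h => hij h.symm) hρj hρi
      · intro a b _ _
        constructor
        · intro h
          by_cases ha : ρ a = ρ j <;> by_cases hb : ρ b = ρ j <;>
            simp only [ha, hb, if_pos, if_false] at h <;> omega
        · intro h
          by_cases ha : ρ a = ρ j <;> by_cases hb : ρ b = ρ j <;>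
            simp only [ha, hb, if_pos, if_false] <;> omega
      · rw [hu.2, if_neg hij]

lemma pvStep_rel (n : Nat) (a : PvStA) (b : PvStB) (h : PvRel n a b)
    (i : Nat) (hi : i < n) (x : Int) : PvRel n (pvStepA i a x) (pvStepB i b x) := by
  obtain ⟨hmap, hlab, hmv, ρ, hg, hiff, hcnt⟩ := h
  cases hx : a.map.get? x with
  | none =>
    have hA : pvStepA i a x = ⟨a.parent, a.size, a.count, a.map.insert x i⟩ := by
      simp only [pvStepA, hx]
    have hB : pvStepB i b x = ⟨b.label, b.first.insert x i⟩ := by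
      simp only [pvStepB, ← hmap, hx]
    rw [hA, hB]
    refine ⟨by rw [hmap], hlab, ?_, ρ, hg, hiff, hcnt⟩
    intro y jv hy
    by_cases hyx : y = x
    · subst hyx
      rw [PySem.Dict.get?_insert_self] at hy
      cases hy
      exact hi
    · rw [PySem.Dict.get?_insert_of_ne a.map i hyx] at hy
      exact hmv y jv hy
  | some j =>
    have hj : j < n := hmv x j hx
    obtain ⟨ρ', hg', hiff', hcnt'⟩ := pvUnion_spec a.parent a.size a.count n ρ hg i j hi hj
    have hA : pvStepA i a x = ⟨(pvUnion a.parent a.size a.count i j).1,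
        (pvUnion a.parent a.size a.count i j).2.1,
        (pvUnion a.parent a.size a.count i j).2.2, a.map⟩ := by
      simp only [pvStepA, hx]
    by_cases hij : ρ i = ρ j
    · have hlabeq : b.label.getD i 0 = b.label.getD j 0 := (hiff i j hi hj).mp hij
      have hB : pvStepB i b x = b := by
        simp only [pvStepB, ← hmap, hx]
        rw [if_neg (fun hc : b.label.getD i 0 ≠ b.label.getD j 0 => hc hlabeq)]
      rw [hA, hB]
      refine ⟨hmap, hlab, hmv, ρ', hg', ?_, ?_⟩
      · intro p q hp hq
        have e1 := hiff p q hp hq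
        rw [hiff' p q hp hq]
        constructor
        · rintro (hh | ⟨h1, h2⟩ | ⟨h1, h2⟩)
          · exact e1.mp hh
          · exact e1.mp (by omega)
          · exact e1.mp (by omega)
        · intro hh
          exact Or.inl (e1.mpr hh)
      · rw [hcnt', if_pos hij]
        exact hcnt
    · have hlabne : b.label.getD i 0 ≠ b.label.getD j 0 := fun hc => hij ((hiff i j hi hj).mpr hc)
      have hB : pvStepB i b x =
          ⟨pvRelabel b.label (b.label.getD i 0) (b.label.getD j 0), b.first⟩ := by
        simp only [pvStepB, ← hmap, hx]
        rw [if_pos hlabne]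
      rw [hA, hB]
      have hila : b.label.getD i 0 ∈ b.label := by
        rw [List.getD_eq_getElem _ _ (by rw [hlab]; exact hi)]
        exact List.getElem_mem _
      have hjlb : b.label.getD j 0 ∈ b.label := by
        rw [List.getD_eq_getElem _ _ (by rw [hlab]; exact hj)]
        exact List.getElem_mem _
      have hget' : ∀ p, p < n →
          (pvRelabel b.label (b.label.getD i 0) (b.label.getD j 0)).getD p 0 =
          (if b.label.getD p 0 = b.label.getD i 0 then b.label.getD j 0
           else b.label.getD p 0) :=
        fun p hp => pvGetD_map _ b.label p (by rw [hlab]; exact hp)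
      refine ⟨hmap, by simp [pvRelabel, hlab], hmv, ρ', hg', ?_, ?_⟩
      · intro p q hp hq
        rw [hiff' p q hp hq]
        show _ ↔ (pvRelabel b.label (b.label.getD i 0) (b.label.getD j 0)).getD p 0 =
          (pvRelabel b.label (b.label.getD i 0) (b.label.getD j 0)).getD q 0
        rw [hget' p hp, hget' q hq, pvCollapse_iff]
        rw [hiff p q hp hq, hiff p i hp hi, hiff q j hq hj, hiff p j hp hj, hiff q i hq hi]
      · rw [hcnt', if_neg hij, hcnt]
        show _ = ((pvRelabel b.label (b.label.getD i 0) (b.label.getD j 0)).toFinset.card : Int)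
        have himg : (pvRelabel b.label (b.label.getD i 0) (b.label.getD j 0)).toFinset =
            b.label.toFinset.erase (b.label.getD i 0) := by
          unfold pvRelabel
          have hmapfin : (b.label.map (fun l => if l = b.label.getD i 0 then b.label.getD j 0 else l)).toFinset = b.label.toFinset.image (fun l => if l = b.label.getD i 0 then b.label.getD j 0 else l) := by
            ext z; simp
          rw [hmapfin]
          apply Finset.ext
          intro y
          simp only [Finset.mem_image, Finset.mem_erase, List.mem_toFinset]
          constructor
          · rintro ⟨u, hu, rfl⟩
            by_cases hua : u = b.label.getD i 0
            · rw [if_pos hua]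
              exact ⟨fun hc => hlabne hc.symm, hjlb⟩
            · rw [if_neg hua]
              exact ⟨hua, hu⟩
          · rintro ⟨hya, hy⟩
            exact ⟨y, hy, by rw [if_neg hya]⟩
        rw [himg, Finset.card_erase_of_mem (List.mem_toFinset.mpr hila)]
        have h1le : 1 ≤ b.label.toFinset.card :=
          Finset.card_pos.mpr ⟨b.label.getD i 0, List.mem_toFinset.mpr hila⟩
        rw [Nat.cast_sub h1le, Nat.cast_one]

lemma pvInner_rel (n i : Nat) (hi : i < n) :
    ∀ (xs : List Int) (a : PvStA) (b : PvStB), PvRel n a b →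
      PvRel n (xs.foldl (pvStepA i) a) (xs.foldl (pvStepB i) b) := by
  intro xs
  induction xs with
  | nil => intro a b h; exact h
  | cons x xs ih => intro a b h; exact ih _ _ (pvStep_rel n a b h i hi x)

lemma pvFold_rel (n : Nat) (l : List (List Int × Nat)) (hl : ∀ p ∈ l, p.2 < n) :
    ∀ (a : PvStA) (b : PvStB), PvRel n a b →
      PvRel n (l.foldl (fun st p => p.1.foldl (pvStepA p.2) st) a)
              (l.foldl (fun st p => p.1.foldl (pvStepB p.2) st) b) := by
  induction l with
  | nil => intro a b h; exact h
  | cons p l ih =>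
    intro a b h
    exact ih (fun q hq => hl q (List.mem_cons_of_mem p hq)) _ _
      (pvInner_rel n p.2 (hl p List.mem_cons_self) p.1 a b h)

lemma pvInit_rel (n : Nat) :
    PvRel n ⟨List.range n, List.replicate n (1 : Int), (n : Int), PySem.Dict.empty⟩
            ⟨List.range n, PySem.Dict.empty⟩ := by
  have hr : ∀ p, p < n → (List.range n).getD p 0 = p := by
    intro p hp
    rw [List.getD_eq_getElem _ _ (by simpa using hp)]
    simp
  have hr' : ∀ p, p < n → (List.range n).getD p p = p := by
    intro p hp
    rw [List.getD_eq_getElem _ _ (by simpa using hp)]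
    simp
  refine ⟨rfl, by simp, ?_, id, ⟨by simp, ?_, ?_, ?_, ?_, ?_⟩, ?_, ?_⟩
  · intro x jv hx
    rw [PySem.Dict.get?_empty] at hx
    cases hx
  · intro p hp; rw [hr' p hp]; exact hp
  · intro p hp; exact hp
  · intro p hp; exact hr' p hp
  · intro p hp; rw [hr' p hp]
  · intro p hp; exact ⟨0, rfl⟩
  · intro p q hp hq
    rw [hr p hp, hr q hq]
    exact Iff.rfl
  · show (n : Int) = _
    rw [List.toFinset_card_of_nodup (List.nodup_range), List.length_range]

-- ===== VERDICT (by name: the statement is the Claim_ definition above) =====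
theorem setUnion_spec : Claim_equal_setUnion := by
  intro sets _
  show setUnion sets = setUnion_alt sets
  unfold setUnion setUnion_alt
  have hl : ∀ p ∈ sets.zipIdx, p.2 < sets.length := by
    intro p hp
    obtain ⟨x, k⟩ := p
    have := List.mem_zipIdx hp
    omega
  have h := pvFold_rel sets.length sets.zipIdx hl _ _ (pvInit_rel sets.length)
  obtain ⟨-, -, -, ρ, -, -, hc⟩ := h
  simp only [hc, pvOfList_length]
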